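-- pv_equiv track=rewrite | github.com/shivangagarwal-jfs/ffr-insights | app/validation/post_llm.py | _rupee_amount_allowed
-- ===== SOURCE A (Python) =====
-- import itertools
--
-- def _rupee_amount_allowed(amt: int, allowed: set[int]) -> bool:
--     if amt in allowed:
--         return True
--     slack = max(500, int(0.015 * max(amt, 1)))
--     for a in allowed:
--         if abs(amt - a) <= slack:
--             return True
--     pool = sorted({x for x in allowed if 100 <= x < 2_000_000})[:20]
--     sum_slack = max(400, int(0.05 * max(amt, 1)))
--     for r in range(2, min(5, len(pool) + 1)):
--         for combo in itertools.combinations(pool, r):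
--             if abs(amt - sum(combo)) <= sum_slack:
--                 return True
--     return False
-- ===== SOURCE B (Python) =====
-- def _rupee_amount_allowed(amt: int, allowed: set[int]) -> bool:
--     # single slack scan (an exact member is within slack of itself, slack >= 500)
--     slack = max(500, int(0.015 * max(amt, 1)))
--     if any(abs(amt - a) <= slack for a in allowed):
--         return True
--     pool = sorted({x for x in allowed if 100 <= x < 2_000_000})[:20]
--     sum_slack = max(400, int(0.05 * max(amt, 1)))
--     # subset-sum DP: reach[k] = sums achievable with exactly k distinct pool elements
--     reach = {1: set(), 2: set(), 3: set(), 4: set()}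
--     for x in pool:
--         for k in (3, 2, 1):
--             reach[k + 1] |= {s + x for s in reach[k]}
--         reach[1].add(x)
--     return any(abs(amt - s) <= sum_slack for k in (2, 3, 4) for s in reach[k])
-- ===== Notes on version B (the rewrite author's own statement) =====
-- stated objective: alternative
-- what changed: The redundant 'amt in allowed' test is folded into the slack scan (slack >= 500 > 0), and the naive enumeration of all 2-, 3- and 4-element combinations of the pool is replaced by a subset-sum DP that folds once over the pool maintaining the sets of sums reachable with exactly 1..4 distinct elements, then scans those reachable sums once.
import Mathlib
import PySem

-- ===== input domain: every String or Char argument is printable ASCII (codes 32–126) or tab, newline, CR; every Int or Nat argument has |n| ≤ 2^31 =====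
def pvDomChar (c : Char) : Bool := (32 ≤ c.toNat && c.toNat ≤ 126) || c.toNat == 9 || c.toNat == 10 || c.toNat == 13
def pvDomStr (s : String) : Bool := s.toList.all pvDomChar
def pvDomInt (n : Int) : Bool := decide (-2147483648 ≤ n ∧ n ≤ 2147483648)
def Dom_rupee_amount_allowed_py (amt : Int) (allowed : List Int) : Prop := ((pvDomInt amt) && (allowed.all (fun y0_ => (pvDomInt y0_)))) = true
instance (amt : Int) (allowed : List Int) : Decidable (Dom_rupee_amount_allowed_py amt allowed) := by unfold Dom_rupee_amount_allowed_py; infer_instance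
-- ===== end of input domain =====

-- B replaces A's enumeration of all 2..4-element combinations of the pool with a subset-sum DP
-- table of the sums reachable by exactly 1..4 distinct pool elements (objective: alternative).

-- Shared float helper: exact emulation of Python's int(c * x) for x : Nat with x ≤ 2^31 and a
-- positive IEEE-754 double c = M · 2^(-negE): round the exact product M·x to the nearest double
-- (53-bit mantissa, ties to even), then truncate.  Used by both ports for int(0.015*·) / int(0.05*·).
def pvFloatMulFloor (M negE x : Nat) : Nat :=
  let p := M * x
  let sh := PySem.Int.bitLength (p : Int) - 53
  let h := 2 ^ sh
  let q0 := p / h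
  let r := p % h
  let q := if 2 * r > h ∨ (2 * r = h ∧ q0 % 2 = 1) then q0 + 1 else q0
  q * 2 ^ sh / 2 ^ negE

-- int(0.015 * x) for 0 ≤ x ≤ 2^31; the double 0.015 is 8646911284551352 · 2^(-59)
def pvIntTimes0015 (x : Int) : Int := (pvFloatMulFloor 8646911284551352 59 x.toNat : Int)
-- int(0.05 * x) for 0 ≤ x ≤ 2^31; the double 0.05 is 7205759403792794 · 2^(-57)
def pvIntTimes005 (x : Int) : Int := (pvFloatMulFloor 7205759403792794 57 x.toNat : Int)

-- ===== PORT A =====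
-- 'for a in allowed: if … return True' is order-independent (an any), so iterating the set is exact;
-- '[:20]' is List.take 20 (nonnegative bounds).
def rupee_amount_allowed_py (amt : Int) (allowed : List Int) : Bool :=
  if allowed.contains amt then true
  else
    let slack : Int := max 500 (pvIntTimes0015 (max amt 1))
    if allowed.any (fun a => decide (|amt - a| ≤ slack)) then true
    else
      let pool := (PySem.List.sorted (PySem.Set.ofList (allowed.filter (fun x => decide (100 ≤ x ∧ x < 2000000)))) (fun x => x)).take 20
      let sum_slack : Int := max 400 (pvIntTimes005 (max amt 1))
      if (PySem.List.pyRange 2 (min 5 ((pool.length : Int) + 1))).any (fun r =>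
           (PySem.List.combinations pool r.toNat).any (fun combo => decide (|amt - combo.sum| ≤ sum_slack)))
      then true else false

-- ===== PORT B =====
-- one DP step: reach[k+1] |= {s + x for s in reach[k]} for k = 3,2,1 (all read the old table), then reach[1].add(x)
def pvReachStep (st : List Int × List Int × List Int × List Int) (x : Int) :
    List Int × List Int × List Int × List Int :=
  (PySem.Set.add st.1 x,
   PySem.Set.union st.2.1 (st.1.map (fun s => s + x)),
   PySem.Set.union st.2.2.1 (st.2.1.map (fun s => s + x)),
   PySem.Set.union st.2.2.2 (st.2.2.1.map (fun s => s + x)))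

def rupee_amount_allowed_py_alt (amt : Int) (allowed : List Int) : Bool :=
  let slack : Int := max 500 (pvIntTimes0015 (max amt 1))
  if allowed.any (fun a => decide (|amt - a| ≤ slack)) then true
  else
    let pool := (PySem.List.sorted (PySem.Set.ofList (allowed.filter (fun x => decide (100 ≤ x ∧ x < 2000000)))) (fun x => x)).take 20
    let sum_slack : Int := max 400 (pvIntTimes005 (max amt 1))
    let reach := pool.foldl pvReachStep ([], [], [], [])
    reach.2.1.any (fun s => decide (|amt - s| ≤ sum_slack)) ||
    reach.2.2.1.any (fun s => decide (|amt - s| ≤ sum_slack)) ||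
    reach.2.2.2.any (fun s => decide (|amt - s| ≤ sum_slack))

-- ===== PRECONDITION & SPEC =====
def Spec_rupee_amount_allowed_py (amt : Int) (allowed : List Int) (out : Bool) : Prop := out = rupee_amount_allowed_py_alt amt allowed
instance (amt : Int) (allowed : List Int) (out : Bool) : Decidable (Spec_rupee_amount_allowed_py amt allowed out) := by unfold Spec_rupee_amount_allowed_py; infer_instance

-- ===== CLAIM (what is proved, stated in full; the proofs are below) =====
def Claim_equal_rupee_amount_allowed_py : Prop := ∀ (amt : Int) (allowed : List Int), Dom_rupee_amount_allowed_py amt allowed → Spec_rupee_amount_allowed_py amt allowed (rupee_amount_allowed_py amt allowed)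

-- ===== LEMMAS AND PROOFS =====

-- "s is the sum of some k-element combination (sublist) of xs"
def pvHasComb (xs : List Int) (k : Nat) (s : Int) : Prop :=
  ∃ c : List Int, c.Sublist xs ∧ c.length = k ∧ c.sum = s

theorem pvHasComb_nil (k : Nat) (s : Int) : pvHasComb [] (k + 1) s ↔ False := by
  constructor
  · rintro ⟨c, hc, hl, _⟩
    simp [List.sublist_nil.mp hc] at hl
  · exact False.elim

theorem pvHasComb_zero (xs : List Int) (s : Int) : pvHasComb xs 0 s ↔ s = 0 := by
  constructor
  · rintro ⟨c, _, hl, hs⟩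
    simp [List.length_eq_zero_iff.mp hl] at hs
    omega
  · rintro rfl; exact ⟨[], List.nil_sublist _, rfl, rfl⟩

theorem pvHasComb_concat (xs : List Int) (x : Int) (k : Nat) (s : Int) :
    pvHasComb (xs ++ [x]) (k + 1) s ↔ pvHasComb xs (k + 1) s ∨ ∃ t, pvHasComb xs k t ∧ s = t + x := by
  constructor
  · rintro ⟨c, hc, hl, hs⟩
    rcases List.sublist_append_iff.mp hc with ⟨l1, l2, rfl, h1, h2⟩
    rcases List.sublist_singleton.mp h2 with rfl | rfl
    · exact Or.inl ⟨l1, by simpa using h1, by simpa using hl, by simpa using hs⟩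
    · refine Or.inr ⟨l1.sum, ⟨l1, h1, by simpa using hl, rfl⟩, ?_⟩
      simpa using hs.symm
  · rintro (⟨c, hc, hl, hs⟩ | ⟨t, ⟨c, hc, hl, hs⟩, rfl⟩)
    · exact ⟨c, hc.trans (List.sublist_append_left _ _), hl, hs⟩
    · exact ⟨c ++ [x], hc.append (List.Sublist.refl _), by simp [hl], by simp [hs]⟩

-- the DP invariant: after folding xs, component k holds exactly the k-combination sums of xs
theorem pvReach_inv (xs : List Int) (s : Int) :
    (s ∈ (xs.foldl pvReachStep ([], [], [], [])).1 ↔ pvHasComb xs 1 s) ∧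
    (s ∈ (xs.foldl pvReachStep ([], [], [], [])).2.1 ↔ pvHasComb xs 2 s) ∧
    (s ∈ (xs.foldl pvReachStep ([], [], [], [])).2.2.1 ↔ pvHasComb xs 3 s) ∧
    (s ∈ (xs.foldl pvReachStep ([], [], [], [])).2.2.2 ↔ pvHasComb xs 4 s) := by
  induction xs using List.reverseRecOn generalizing s with
  | nil => simp [pvHasComb_nil]
  | append_singleton xs x ih =>
    simp only [List.foldl_append, List.foldl_cons, List.foldl_nil, pvReachStep,
      PySem.Set.mem_add, PySem.Set.mem_union, List.mem_map, pvHasComb_concat,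
      pvHasComb_zero]
    refine ⟨?_, ?_, ?_, ?_⟩
    · rw [(ih s).1]
      constructor
      · rintro (h | rfl)
        · exact Or.inl h
        · exact Or.inr ⟨0, rfl, by ring⟩
      · rintro (h | ⟨t, rfl, rfl⟩)
        · exact Or.inl h
        · exact Or.inr (by ring)
    · constructor
      · rintro (h | ⟨t, ht, rfl⟩)
        · exact Or.inl ((ih s).2.1.mp h)
        · exact Or.inr ⟨t, (ih t).1.mp ht, rfl⟩
      · rintro (h | ⟨t, ht, rfl⟩)
        · exact Or.inl ((ih s).2.1.mpr h)
        · exact Or.inr ⟨t, (ih t).1.mpr ht, rfl⟩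
    · constructor
      · rintro (h | ⟨t, ht, rfl⟩)
        · exact Or.inl ((ih s).2.2.1.mp h)
        · exact Or.inr ⟨t, (ih t).2.1.mp ht, rfl⟩
      · rintro (h | ⟨t, ht, rfl⟩)
        · exact Or.inl ((ih s).2.2.1.mpr h)
        · exact Or.inr ⟨t, (ih t).2.1.mpr ht, rfl⟩
    · constructor
      · rintro (h | ⟨t, ht, rfl⟩)
        · exact Or.inl ((ih s).2.2.2.mp h)
        · exact Or.inr ⟨t, (ih t).2.2.1.mp ht, rfl⟩
      · rintro (h | ⟨t, ht, rfl⟩)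
        · exact Or.inl ((ih s).2.2.2.mpr h)
        · exact Or.inr ⟨t, (ih t).2.2.1.mpr ht, rfl⟩

-- the combination stage of A equals the DP stage of B (for any amount, slack and pool)
theorem stage2_eq (amt ss : Int) (pool : List Int) :
    ((PySem.List.pyRange 2 (min 5 ((pool.length : Int) + 1))).any (fun r =>
       (PySem.List.combinations pool r.toNat).any (fun combo => decide (|amt - combo.sum| ≤ ss))))
    = ((pool.foldl pvReachStep ([], [], [], [])).2.1.any (fun s => decide (|amt - s| ≤ ss)) ||
       (pool.foldl pvReachStep ([], [], [], [])).2.2.1.any (fun s => decide (|amt - s| ≤ ss)) ||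
       (pool.foldl pvReachStep ([], [], [], [])).2.2.2.any (fun s => decide (|amt - s| ≤ ss))) := by
  rw [Bool.eq_iff_iff]
  simp only [List.any_eq_true, Bool.or_eq_true, decide_eq_true_eq,
    PySem.List.mem_pyRange_one, PySem.List.mem_combinations_iff]
  constructor
  · rintro ⟨r, ⟨hr2, hr5⟩, c, ⟨hsub, hlen⟩, hP⟩
    have h5 : r < 5 := lt_of_lt_of_le hr5 (min_le_left _ _)
    have hk : r.toNat = 2 ∨ r.toNat = 3 ∨ r.toNat = 4 := by omega
    rcases hk with hk | hk | hk
    · exact Or.inl (Or.inl ⟨c.sum, ((pvReach_inv pool c.sum).2.1).mpr ⟨c, hsub, by omega, rfl⟩, hP⟩)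
    · exact Or.inl (Or.inr ⟨c.sum, ((pvReach_inv pool c.sum).2.2.1).mpr ⟨c, hsub, by omega, rfl⟩, hP⟩)
    · exact Or.inr ⟨c.sum, ((pvReach_inv pool c.sum).2.2.2).mpr ⟨c, hsub, by omega, rfl⟩, hP⟩
  · have core : ∀ k : Nat, 2 ≤ k → k ≤ 4 → ∀ s, pvHasComb pool k s → |amt - s| ≤ ss →
        ∃ r : Int, (2 ≤ r ∧ r < min 5 ((pool.length : Int) + 1)) ∧
          ∃ c : List Int, (c.Sublist pool ∧ c.length = r.toNat) ∧ |amt - c.sum| ≤ ss := by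
      rintro k hk2 hk4 s ⟨c, hsub, hlen, rfl⟩ hP
      have hle : c.length ≤ pool.length := hsub.length_le
      exact ⟨(k : Int), ⟨by omega, by simp; omega⟩, c, ⟨hsub, by omega⟩, hP⟩
    rintro ((⟨s, hs, hP⟩ | ⟨s, hs, hP⟩) | ⟨s, hs, hP⟩)
    · exact core 2 (by omega) (by omega) s (((pvReach_inv pool s).2.1).mp hs) hP
    · exact core 3 (by omega) (by omega) s (((pvReach_inv pool s).2.2.1).mp hs) hP
    · exact core 4 (by omega) (by omega) s (((pvReach_inv pool s).2.2.2).mp hs) hP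

-- A's redundant 'amt in allowed' check is subsumed by the slack scan (slack ≥ 500 ≥ 0)
theorem any_slack_of_contains (amt : Int) (allowed : List Int) (hc : allowed.contains amt = true) :
    allowed.any (fun a => decide (|amt - a| ≤ max 500 (pvIntTimes0015 (max amt 1)))) = true := by
  refine List.any_eq_true.mpr ⟨amt, by simpa using hc, ?_⟩
  simp only [sub_self, abs_zero, decide_eq_true_eq]
  exact le_trans (by norm_num) (le_max_left _ _)

theorem main_eq (amt : Int) (allowed : List Int) :
    rupee_amount_allowed_py amt allowed = rupee_amount_allowed_py_alt amt allowed := by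
  unfold rupee_amount_allowed_py rupee_amount_allowed_py_alt
  dsimp only
  split_ifs with h1 h2 h2 h3
  · rfl
  · exact absurd (any_slack_of_contains amt allowed h1) h2
  · rfl
  · rw [← stage2_eq]
    exact h3.symm
  · rw [← stage2_eq]
    simp only [Bool.not_eq_true] at h3
    exact h3.symm

-- ===== VERDICT (by name: the statement is the Claim_ definition above) =====
theorem rupee_amount_allowed_py_spec : Claim_equal_rupee_amount_allowed_py := by
  intro amt allowed _
  unfold Spec_rupee_amount_allowed_py
  exact main_eq amt allowed
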